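-- pv_equiv track=rewrite | github.com/TobiasEdman/imintengine | scripts/analyze_date_issues.py | target_year_from_dates
-- ===== SOURCE A (Python) =====
-- from collections import Counter
--
-- def target_year_from_dates(dates: list[str]) -> int:
--     """
--     Infer intended primary growing-season year.
--     Uses modal year among d[1,2,3]; tie-breaks to smallest (older) year.
--     """
--     years = []
--     for d in dates:
--         s = str(d).strip()
--         years.append(int(s[:4]) if (len(s) >= 4 and s[:4].isdigit()) else 0)
--     if len(years) != 4:
--         return 0
--     cnt = Counter(years[1:4])
--     return sorted(cnt.items(), key=lambda x: (-x[1], x[0]))[0][0]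
-- ===== SOURCE B (Python) =====
-- def _year(d):
--     s = str(d).strip()
--     return int(s[:4]) if (len(s) >= 4 and s[:4].isdigit()) else 0
--
-- def target_year_from_dates(dates: list[str]) -> int:
--     """Modal year among dates[1:4] (tie-break: smallest), via direct 3-way
--     case analysis instead of building a Counter and sorting its items."""
--     if len(dates) != 4:
--         return 0
--     a, b, c = (_year(d) for d in dates[1:])
--     if a == b or a == c:
--         return a
--     if b == c:
--         return b
--     return min(a, b, c)
-- ===== Notes on version B (the rewrite author's own statement) =====
-- stated objective: simpler
-- what changed: Checks len(dates) != 4 first (so non-4-element inputs skip parsing entirely) and replaces the Counter over dates[1:4] plus sort of its (count, year) items by a direct 3-way case analysis of the three parsed years: the repeated year if any, else the minimum.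
import Mathlib
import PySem

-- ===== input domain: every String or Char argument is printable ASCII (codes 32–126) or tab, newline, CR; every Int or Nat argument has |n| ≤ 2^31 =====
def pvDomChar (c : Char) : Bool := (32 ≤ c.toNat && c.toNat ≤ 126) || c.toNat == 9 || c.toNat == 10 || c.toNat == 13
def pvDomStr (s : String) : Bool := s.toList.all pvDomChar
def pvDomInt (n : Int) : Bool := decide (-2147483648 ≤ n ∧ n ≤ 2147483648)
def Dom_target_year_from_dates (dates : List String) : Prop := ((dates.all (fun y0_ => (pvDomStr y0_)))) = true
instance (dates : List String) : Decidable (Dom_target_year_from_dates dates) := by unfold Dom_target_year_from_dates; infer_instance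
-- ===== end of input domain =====

-- B replaces A's Counter-plus-sort core by a direct 3-way case analysis of the
-- three years (simpler); the per-date parsing is unchanged.

-- ===== PORT A =====
-- years.append(int(s[:4]) if (len(s) >= 4 and s[:4].isdigit()) else 0); the isdigit
-- guard makes int() succeed, so the .getD 0 default of ofChars? is never taken.
def pvYearA (d : String) : Int :=
  let s := PySem.Chars.strip d.toList
  if 4 ≤ s.length ∧ PySem.Chars.strIsdigit (PySem.List.slice s none (some 4)) then
    (PySem.Int.ofChars? (PySem.List.slice s none (some 4))).getD 0
  else 0

def target_year_from_dates (dates : List String) : Int :=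
  let years := dates.foldl (fun acc d => acc ++ [pvYearA d]) []
  if years.length ≠ 4 then 0
  else
    let cnt := PySem.Dict.counter (PySem.List.slice years (some 1) (some 4))
    -- sorted(cnt.items(), key=lambda x: (-x[1], x[0]))[0][0]; cnt is nonempty here,
    -- so the [0] indexing never raises and the [] branch is unreachable.
    match PySem.List.sorted2 cnt.items (fun x => -x.2) (fun x => x.1) with
    | [] => 0
    | p :: _ => p.1

-- ===== PORT B =====
-- Source B's _year helper (textually the same parsing as in A).
def pvYearB (d : String) : Int :=
  let s := PySem.Chars.strip d.toList
  if 4 ≤ s.length ∧ PySem.Chars.strIsdigit (PySem.List.slice s none (some 4)) then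
    (PySem.Int.ofChars? (PySem.List.slice s none (some 4))).getD 0
  else 0

def target_year_from_dates_alt (dates : List String) : Int :=
  if dates.length ≠ 4 then 0
  else
    match (dates.drop 1).map pvYearB with
    | [a, b, c] =>
        if a = b ∨ a = c then a
        else if b = c then b
        else min a (min b c)
    | _ => 0

-- ===== PRECONDITION & SPEC =====
def Spec_target_year_from_dates (dates : List String) (out : Int) : Prop := out = target_year_from_dates_alt dates
instance (dates : List String) (out : Int) : Decidable (Spec_target_year_from_dates dates out) := by unfold Spec_target_year_from_dates; infer_instance

-- ===== CLAIM (what is proved, stated in full; the proofs are below) =====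
def Claim_equal_target_year_from_dates : Prop := ∀ (dates : List String), Dom_target_year_from_dates dates → Spec_target_year_from_dates dates (target_year_from_dates dates)

-- ===== LEMMAS AND PROOFS =====

-- A's Counter+sorted head over three years equals B's 3-way case analysis.
theorem pv_core (a b c : Int) :
    (match PySem.List.sorted2 ((PySem.Dict.counter [a, b, c]).items)
        (fun x => -x.2) (fun x => x.1) with
      | [] => (0 : Int) | p :: _ => p.1)
    = if a = b ∨ a = c then a else if b = c then b else min a (min b c) := by
  rw [PySem.Dict.items_counter]
  by_cases hab : a = b
  · subst hab
    by_cases hac : a = c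
    · subst hac
      simp [PySem.Set.ofList, PySem.Set.add, PySem.Set.contains,
        List.count_cons, PySem.List.sorted2, PySem.List.insertBy]
    · simp [PySem.Set.ofList, PySem.Set.add, PySem.Set.contains, hac, Ne.symm hac,
        List.count_cons, PySem.List.sorted2, PySem.List.insertBy]
  · by_cases hac : a = c
    · subst hac
      simp [PySem.Set.ofList, PySem.Set.add, PySem.Set.contains, hab, Ne.symm hab,
        List.count_cons, PySem.List.sorted2, PySem.List.insertBy]
    · by_cases hbc : b = c
      · subst hbc
        simp [PySem.Set.ofList, PySem.Set.add, PySem.Set.contains, hab, Ne.symm hab,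
          List.count_cons, PySem.List.sorted2, PySem.List.insertBy]
      · simp [PySem.Set.ofList, PySem.Set.add, PySem.Set.contains, hab, hac, hbc,
          Ne.symm hab, Ne.symm hac, Ne.symm hbc,
          List.count_cons, PySem.List.sorted2, PySem.List.insertBy] <;>
        split_ifs <;> simp [PySem.List.insertBy] <;> split_ifs <;> simp <;> omega

-- ===== VERDICT (by name: the statement is the Claim_ definition above) =====
theorem target_year_from_dates_spec : Claim_equal_target_year_from_dates := by
  intro dates _
  unfold Spec_target_year_from_dates target_year_from_dates target_year_from_dates_alt
  rw [PySem.List.foldl_append_singleton_eq_map]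
  simp only [List.nil_append, List.length_map]
  by_cases h : dates.length = 4
  · match dates, h with
    | [s0, s1, s2, s3], _ =>
      simp only [List.map_cons, List.map_nil, List.drop_succ_cons, List.drop_zero,
        List.length_cons, List.length_nil]
      norm_num
      have hsl : PySem.List.slice [pvYearA s0, pvYearA s1, pvYearA s2, pvYearA s3]
          (some 1) (some 4) = [pvYearA s1, pvYearA s2, pvYearA s3] := by
        simp [PySem.List.slice, PySem.List.clampIdx]
      rw [hsl, pv_core]
      rfl
  · simp [h]
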